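-- pv_equiv track=rewrite | github.com/MrBrantCode/unitest_baseline | mut_generate/mist_train_cf/cf_25799/solution.py | kth_most_frequent
-- ===== SOURCE A (Python) =====
-- def kth_most_frequent(s, k):
--     """
--     Returns the kth most frequent word in a given string.
--
--     Parameters:
--     s (str): The input string.
--     k (int): The position of the word in the frequency list.
--
--     Returns:
--     str: The kth most frequent word.
--     """
--     counts = {}
--     words = s.split()
--     for word in words:
--         if word in counts:
--             counts[word] += 1
--         else:
--             counts[word] = 1
--
--     return sorted(counts, key=counts.get, reverse=True)[k-1]
-- ===== SOURCE B (Python) =====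
-- def kth_most_frequent(s, k):
--     counts = {}
--     for w in s.split():
--         counts[w] = counts.get(w, 0) + 1
--     buckets = {}
--     for w, c in counts.items():
--         buckets.setdefault(c, []).append(w)
--     result = []
--     for c in sorted(buckets, reverse=True):
--         result.extend(buckets[c])
--     return result[k - 1]
-- ===== Notes on version B (the rewrite author's own statement) =====
-- stated objective: alternative
-- what changed: B groups the distinct words into buckets keyed by their count and concatenates the buckets in descending count order, sorting only the distinct count values instead of A's stable reverse sort of all distinct words by count.
-- outside the precondition, e.g. on kth_most_frequent('a b', 5): A raises IndexError, B raises IndexError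
import Mathlib
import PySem

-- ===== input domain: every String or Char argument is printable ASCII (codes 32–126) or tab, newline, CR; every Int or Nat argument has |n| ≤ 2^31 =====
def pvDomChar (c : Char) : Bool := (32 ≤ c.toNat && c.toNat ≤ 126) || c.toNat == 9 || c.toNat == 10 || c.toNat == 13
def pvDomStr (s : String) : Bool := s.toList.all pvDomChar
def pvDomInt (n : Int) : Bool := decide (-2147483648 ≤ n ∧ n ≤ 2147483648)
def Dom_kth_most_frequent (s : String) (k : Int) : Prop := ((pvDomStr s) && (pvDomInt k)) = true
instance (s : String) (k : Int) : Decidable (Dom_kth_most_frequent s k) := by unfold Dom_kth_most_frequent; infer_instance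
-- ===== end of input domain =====

-- B replaces A's stable reverse sort of all distinct words by counting into frequency buckets
-- (insertion order preserved per bucket) and concatenating the buckets in descending count order
-- (objective: alternative — only the distinct counts are sorted, not the distinct words).

-- ===== PORT A =====
def kth_most_frequent (s : String) (k : Int) : String :=
  let words := PySem.Str.split₀ s
  let counts := words.foldl
    (fun d w => if d.contains w then d.modify w 0 (· + 1) else d.insert w 1)
    (PySem.Dict.empty : PySem.Dict String Int)
  (PySem.List.pyGet? (PySem.List.sorted counts.keys (fun w => counts.getD w 0) true) (k - 1)).getD ""

-- ===== PORT B =====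
def kth_most_frequent_alt (s : String) (k : Int) : String :=
  let counts := (PySem.Str.split₀ s).foldl
    (fun d w => d.insert w (d.getD w 0 + 1)) (PySem.Dict.empty : PySem.Dict String Int)
  let buckets := counts.items.foldl
    (fun b p => b.modify p.2 [] (· ++ [p.1]))
    (PySem.Dict.empty : PySem.Dict Int (List String))
  let result := (PySem.List.sorted buckets.keys (fun c => c) true).foldl
    (fun acc c => acc ++ buckets.getD c []) []
  (PySem.List.pyGet? result (k - 1)).getD ""

-- ===== PRECONDITION & SPEC =====
-- Pre_ excludes exactly the inputs where Python A raises IndexError: the flat index k-1 must be a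
-- valid Python index into the list of distinct words of s.split().
def Pre_kth_most_frequent (s : String) (k : Int) : Prop :=
  PySem.Raise.InRange (PySem.Set.ofList (PySem.Str.split₀ s)).length (k - 1)
instance (s : String) (k : Int) : Decidable (Pre_kth_most_frequent s k) := by
  unfold Pre_kth_most_frequent; infer_instance
def pvWitness_kth_most_frequent : String × Int := ("a b a", 1)
def Spec_kth_most_frequent (s : String) (k : Int) (out : String) : Prop := out = kth_most_frequent_alt s k
instance (s : String) (k : Int) (out : String) : Decidable (Spec_kth_most_frequent s k out) := by unfold Spec_kth_most_frequent; infer_instance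

-- ===== CLAIM (what is proved, stated in full; the proofs are below) =====
def Claim_equal_kth_most_frequent : Prop := ∀ (s : String) (k : Int), Dom_kth_most_frequent s k → Pre_kth_most_frequent s k → Spec_kth_most_frequent s k (kth_most_frequent s k)

-- ===== LEMMAS AND PROOFS =====

theorem pv_insertBy_cons_true {α : Type} (before : α → α → Bool) (x y : α) (ys : List α)
    (h : before x y = true) : PySem.List.insertBy before x (y :: ys) = x :: y :: ys := by
  simp [PySem.List.insertBy, h]

theorem pv_insertBy_cons_false {α : Type} (before : α → α → Bool) (x y : α) (ys : List α)
    (h : before x y = false) :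
    PySem.List.insertBy before x (y :: ys) = y :: PySem.List.insertBy before x ys := by
  simp [PySem.List.insertBy, h]

theorem pv_insertBy_append_skip {α : Type} (before : α → α → Bool) (x : α) (as bs : List α)
    (h : ∀ y ∈ as, before x y = false) :
    PySem.List.insertBy before x (as ++ bs) = as ++ PySem.List.insertBy before x bs := by
  induction as with
  | nil => rfl
  | cons a as ih =>
      simp only [List.cons_append,
        pv_insertBy_cons_false before x a (as ++ bs) (h a (by simp))]
      rw [ih (fun y hy => h y (by simp [hy]))]

theorem pv_insertBy_front {α : Type} (before : α → α → Bool) (x : α) (ys : List α)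
    (h : ∀ y ∈ ys, before x y = true) :
    PySem.List.insertBy before x ys = x :: ys := by
  cases ys with
  | nil => rfl
  | cons y ys => exact pv_insertBy_cons_true before x y ys (h y (by simp))

-- Insert an element whose key is already among the (strictly descending) distinct keys:
-- it lands at the end of its bucket.
theorem pv_H1 {α : Type} (key : α → Int) (x : α) (D : List Int) (g : Int → List α)
    (hD : D.Pairwise (· > ·)) (hg : ∀ c ∈ D, ∀ w ∈ g c, key w = c) (hmem : key x ∈ D) :
    PySem.List.insertBy (fun a b => decide (key b < key a)) x (D.flatMap g)
      = D.flatMap (fun c => if c = key x then g c ++ [x] else g c) := by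
  induction D with
  | nil => simp at hmem
  | cons d D ih =>
      have hdD : ∀ c ∈ D, c < d := fun c hc => (List.pairwise_cons.mp hD).1 c hc
      have hDp : D.Pairwise (· > ·) := (List.pairwise_cons.mp hD).2
      simp only [List.flatMap_cons]
      by_cases hdx : d = key x
      · have h1 : ∀ y ∈ g d, (fun a b => decide (key b < key a)) x y = false := by
          intro y hy
          have := hg d (by simp) y hy
          simp [this, hdx]
        rw [pv_insertBy_append_skip _ _ _ _ h1]
        have h2 : ∀ z ∈ D.flatMap g, (fun a b => decide (key b < key a)) x z = true := by
          intro z hz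
          rcases List.mem_flatMap.mp hz with ⟨c, hc, hzc⟩
          have hkz := hg c (by simp [hc]) z hzc
          have : c < key x := hdx ▸ hdD c hc
          simp [hkz, this]
        rw [pv_insertBy_front _ _ _ h2]
        have h3 : D.flatMap (fun c => if c = key x then g c ++ [x] else g c) = D.flatMap g := by
          apply List.flatMap_congr
          intro c hc
          have : c ≠ key x := by
            intro h; exact absurd (h ▸ hdD c hc) (by simp [hdx])
          simp [this]
        rw [h3, if_pos hdx]
        simp
      · have hmem' : key x ∈ D := by
          rcases List.mem_cons.mp hmem with h | h
          · exact absurd h.symm hdx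
          · exact h
        have hlt : key x < d := hdD _ hmem'
        have h1 : ∀ y ∈ g d, (fun a b => decide (key b < key a)) x y = false := by
          intro y hy
          have := hg d (by simp) y hy
          simp [this]; omega
        rw [pv_insertBy_append_skip _ _ _ _ h1,
          ih hDp (fun c hc => hg c (by simp [hc])) hmem', if_neg hdx]

-- Insert an element whose key is NOT among the distinct keys: a fresh singleton bucket appears
-- at the key's descending position.
theorem pv_H2 {α : Type} (key : α → Int) (x : α) (D : List Int) (g : Int → List α)
    (hD : D.Pairwise (· > ·)) (hg : ∀ c ∈ D, ∀ w ∈ g c, key w = c) (hnm : key x ∉ D) :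
    PySem.List.insertBy (fun a b => decide (key b < key a)) x (D.flatMap g)
      = (PySem.List.insertBy (fun a b => decide (b < a)) (key x) D).flatMap
          (fun c => if c = key x then [x] else g c) := by
  induction D with
  | nil => simp [PySem.List.insertBy]
  | cons d D ih =>
      have hdD : ∀ c ∈ D, c < d := fun c hc => (List.pairwise_cons.mp hD).1 c hc
      have hDp : D.Pairwise (· > ·) := (List.pairwise_cons.mp hD).2
      have hdx : d ≠ key x := fun h => hnm (by simp [h])
      have hnm' : key x ∉ D := fun h => hnm (by simp [h])
      by_cases h : d < key x
      · have h2 : ∀ z ∈ (d :: D).flatMap g, (fun a b => decide (key b < key a)) x z = true := by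
          intro z hz
          rcases List.mem_flatMap.mp hz with ⟨c, hc, hzc⟩
          have hkz := hg c hc z hzc
          have : c ≤ d := by
            rcases List.mem_cons.mp hc with h' | h'
            · omega
            · have := hdD c h'; omega
          simp [hkz]; omega
        rw [pv_insertBy_front _ _ _ h2,
          pv_insertBy_cons_true _ _ _ _ (by simp [h])]
        have h3 : D.flatMap (fun c => if c = key x then [x] else g c)
            = D.flatMap g := by
          apply List.flatMap_congr
          intro c hc
          have : c ≠ key x := fun hcx => hnm' (hcx ▸ hc)
          simp [this]
        simp [h3, hdx]
      · have hlt : key x < d := by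
          rcases lt_or_gt_of_ne (fun hh : key x = d => hdx hh.symm) with h' | h'
          · exact h'
          · omega
        simp only [List.flatMap_cons]
        have h1 : ∀ y ∈ g d, (fun a b => decide (key b < key a)) x y = false := by
          intro y hy
          have := hg d (by simp) y hy
          simp [this]; omega
        rw [pv_insertBy_append_skip _ _ _ _ h1,
          ih hDp (fun c hc => hg c (by simp [hc]) ) hnm',
          pv_insertBy_cons_false _ _ _ _ (by simp; omega)]
        simp [if_neg hdx]

theorem pv_ofList_append_singleton {α : Type} [BEq α] (as : List α) (c : α) :
    PySem.Set.ofList (as ++ [c]) = PySem.Set.add (PySem.Set.ofList as) c := by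
  rw [PySem.Set.ofList_eq_foldl, List.foldl_append, ← PySem.Set.ofList_eq_foldl]; rfl

-- THE stable-reverse-sort bucket decomposition: sorted(xs, key=key, reverse=True) is the
-- concatenation, over the distinct key values in descending order, of the elements with that
-- key in original order.
theorem pv_sorted_rev_buckets {α : Type} (l : List α) (key : α → Int) :
    PySem.List.sorted l key true
      = (PySem.List.sorted (PySem.Set.ofList (l.map key)) (fun c => c) true).flatMap
          (fun c => l.filter (fun w => key w == c)) := by
  induction l using List.reverseRecOn with
  | nil => rfl
  | append_singleton l x ih =>
      have hDperm := PySem.List.sorted_perm (PySem.Set.ofList (l.map key)) (fun c : Int => c) true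
      have hDnd : (PySem.List.sorted (PySem.Set.ofList (l.map key)) (fun c : Int => c) true).Nodup :=
        hDperm.nodup_iff.mpr (PySem.Set.nodup_ofList _)
      have hDge := PySem.List.sorted_pairwise_rev (PySem.Set.ofList (l.map key)) (fun c : Int => c)
      have hD : (PySem.List.sorted (PySem.Set.ofList (l.map key)) (fun c : Int => c) true).Pairwise (· > ·) := by
        exact (List.Pairwise.and hDnd hDge).imp (by rintro a b ⟨hne, hle⟩; omega)
      set D := PySem.List.sorted (PySem.Set.ofList (l.map key)) (fun c : Int => c) true with hDdef
      have hg : ∀ c ∈ D, ∀ w ∈ l.filter (fun w => key w == c), key w = c := by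
        intro c _ w hw
        simpa using (List.mem_filter.mp hw).2
      rw [PySem.List.sorted_rev_eq_foldl_insertBy, List.foldl_append,
        ← PySem.List.sorted_rev_eq_foldl_insertBy, ih]
      simp only [List.foldl_cons, List.foldl_nil]
      by_cases hmem : key x ∈ D
      · rw [pv_H1 key x D _ hD hg hmem]
        have hS : PySem.Set.ofList ((l ++ [x]).map key) = PySem.Set.ofList (l.map key) := by
          rw [List.map_append, List.map_singleton, pv_ofList_append_singleton]
          have : key x ∈ PySem.Set.ofList (l.map key) :=
            (PySem.List.mem_sorted _ _ _ _).mp hmem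
          simp [PySem.Set.add, PySem.Set.contains, this]
        rw [hS, ← hDdef]
        apply List.flatMap_congr
        intro c hc
        by_cases hcx : c = key x
        · subst hcx
          simp [List.filter_append]
        · have : (key x == c) = false := by simp; exact fun h => hcx h.symm
          simp [List.filter_append, hcx, this]
      · rw [pv_H2 key x D _ hD hg hmem]
        have hS : PySem.Set.ofList ((l ++ [x]).map key)
            = PySem.Set.ofList (l.map key) ++ [key x] := by
          rw [List.map_append, List.map_singleton, pv_ofList_append_singleton]
          have : key x ∉ PySem.Set.ofList (l.map key) := fun h =>
            hmem ((PySem.List.mem_sorted _ _ _ _).mpr h)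
          simp [PySem.Set.add, PySem.Set.contains, this]
        rw [hS, PySem.List.sorted_rev_eq_foldl_insertBy, List.foldl_append,
          ← PySem.List.sorted_rev_eq_foldl_insertBy]
        simp only [List.foldl_cons, List.foldl_nil, ← hDdef]
        apply List.flatMap_congr
        intro c hc
        by_cases hcx : c = key x
        · subst hcx
          have hxl : key x ∉ l.map key := by
            intro h
            exact hmem ((PySem.List.mem_sorted _ _ _ _).mpr ((PySem.Set.mem_ofList _ _).mpr h))
          have hfil : l.filter (fun w => key w == key x) = [] := by
            rw [List.filter_eq_nil_iff]
            intro w hw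
            simp
            intro h
            exact absurd (List.mem_map.mpr ⟨w, hw, h⟩) hxl
          simp [List.filter_append, hfil]
        · have hcD : c ∈ D := by
            rcases (PySem.List.mem_insertBy _ _ _ _).mp hc with h | h
            · exact absurd h hcx
            · exact h
          have : (key x == c) = false := by simp; exact fun h => hcx h.symm
          simp [List.filter_append, hcx, this]

-- A's count loop builds Counter(words).
theorem pv_countsA_eq (words : List String) :
    words.foldl
      (fun d w => if d.contains w then d.modify w 0 (· + 1) else d.insert w 1)
      (PySem.Dict.empty : PySem.Dict String Int) = PySem.Dict.counter words := by
  rw [PySem.Dict.counter_eq_foldl]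
  apply PySem.List.foldl_congr_mem
  intro d w _
  by_cases h : d.contains w = true
  · simp [h]
  · have h0 : d.getD w 0 = 0 :=
      PySem.Dict.getD_of_not_contains d 0 (by simpa using h)
    simp [h, PySem.Dict.modify, h0]

-- The two ports compute the same candidate list, hence the same answer (for every s and k).
theorem pv_ports_eq (s : String) (k : Int) :
    kth_most_frequent s k = kth_most_frequent_alt s k := by
  unfold kth_most_frequent kth_most_frequent_alt
  simp only []
  rw [pv_countsA_eq, PySem.Dict.foldl_insert_getD_add_one_eq_counter]
  set words := PySem.Str.split₀ s with hw
  set C := PySem.Dict.counter words with hC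
  -- A's list
  have hkeyfun : (fun w => C.getD w 0) = fun w => (words.count w : Int) := by
    funext w; exact PySem.Dict.getD_counter words w
  -- B's buckets, via the swapped-pair view
  have hfold :
      C.items.foldl (fun b p => b.modify p.2 [] (· ++ [p.1]))
          (PySem.Dict.empty : PySem.Dict Int (List String))
        = (C.items.map Prod.swap).foldl (fun b q => b.modify q.1 [] (· ++ [q.2]))
          (PySem.Dict.empty : PySem.Dict Int (List String)) := by
    rw [List.foldl_map]; rfl
  rw [hfold]
  set sw := C.items.map Prod.swap with hsw
  have hitems : C.items = (PySem.Set.ofList words).map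
      (fun w => (w, (words.count w : Int))) := PySem.Dict.items_counter words
  have hswv : sw = (PySem.Set.ofList words).map (fun w => ((words.count w : Int), w)) := by
    rw [hsw, hitems, List.map_map]; rfl
  set B := sw.foldl (fun b q => b.modify q.1 [] (· ++ [q.2]))
      (PySem.Dict.empty : PySem.Dict Int (List String)) with hB
  have hBkeys : B.keys = PySem.Set.ofList (sw.map (·.1)) := by
    rw [hB]
    rw [PySem.Dict.keys_foldl_modify_key sw (fun q => q.1) [] (fun _ q => (· ++ [q.2]))
      PySem.Dict.empty]
    simp [PySem.Set.update, PySem.Set.ofList_eq_foldl]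
  have hBget : ∀ c : Int, B.getD c []
      = (PySem.Set.ofList words).filter (fun w => (words.count w : Int) == c) := by
    intro c
    rw [hB, PySem.Dict.getD_foldl_modify_append sw PySem.Dict.empty c]
    rw [hswv, List.filter_map]
    simp [Function.comp_def, List.map_map, Function.comp_def]
  have hmapfst : sw.map (·.1) = (PySem.Set.ofList words).map (fun w => (words.count w : Int)) := by
    rw [hswv, List.map_map]; rfl
  -- the two candidate lists coincide
  have hlists :
      PySem.List.sorted C.keys (fun w => C.getD w 0) true
        = (PySem.List.sorted B.keys (fun c : Int => c) true).foldl
            (fun acc c => acc ++ B.getD c []) [] := by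
    rw [PySem.List.foldl_append_eq_flatMap, List.nil_append]
    rw [PySem.Dict.keys_counter, hkeyfun, hBkeys, hmapfst]
    rw [pv_sorted_rev_buckets (PySem.Set.ofList words) (fun w => (words.count w : Int))]
    apply List.flatMap_congr
    intro c _
    rw [hBget c]
  rw [hlists]

-- ===== VERDICT (by name: the statement is the Claim_ definition above) =====
theorem kth_most_frequent_spec : Claim_equal_kth_most_frequent := by
  intro s k _ _
  unfold Spec_kth_most_frequent
  exact pv_ports_eq s k
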